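-- pv_equiv track=rewrite | github.com/grigoresc/adventofcode.2018 | 02/run.py | cnt1
-- ===== SOURCE A (Python) =====
-- def cnt1(line):
--     d=dict()
--     for c in line:
--         if not c in d:
--             d[c]=0
--         d[c]+=1
--     c2 = 1 if 2 in d.values() else 0
--     c3 = 1 if 3 in d.values() else 0
--     return (c2,c3)
-- ===== SOURCE B (Python) =====
-- def cnt1(line):
--     # Sort the characters so equal letters become adjacent, then scan run lengths once.
--     s = sorted(line)
--     has2 = False
--     has3 = False
--     run = 1
--     for i in range(1, len(s) + 1):
--         if i < len(s) and s[i] == s[i - 1]: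
--             run += 1
--         else:
--             if run == 2:
--                 has2 = True
--             if run == 3:
--                 has3 = True
--             run = 1
--     if not s:
--         return (0, 0)
--     return (1 if has2 else 0, 1 if has3 else 0)
-- ===== Notes on version B (the rewrite author's own statement) =====
-- stated objective: alternative
-- what changed: Replaces A's hash-table frequency counting with sort-then-scan: B sorts the characters so equal letters become adjacent, then a single run-length scan over the sorted list detects a run of length exactly 2 and one of exactly 3; no frequency table is ever built.
import Mathlib
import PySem

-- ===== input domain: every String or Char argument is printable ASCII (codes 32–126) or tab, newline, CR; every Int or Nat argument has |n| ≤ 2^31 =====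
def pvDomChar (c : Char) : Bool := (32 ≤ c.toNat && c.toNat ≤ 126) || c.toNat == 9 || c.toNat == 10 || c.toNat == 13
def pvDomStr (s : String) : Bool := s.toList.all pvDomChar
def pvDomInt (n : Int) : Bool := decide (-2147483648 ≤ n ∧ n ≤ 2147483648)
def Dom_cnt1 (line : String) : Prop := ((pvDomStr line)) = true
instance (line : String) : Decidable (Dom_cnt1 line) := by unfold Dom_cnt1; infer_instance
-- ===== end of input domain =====

-- B replaces A's frequency-dict loop by sort-then-scan: sort the characters, then one
-- run-length scan of the sorted list detects a run of length exactly 2 / exactly 3 (alternative algorithm, same result).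

-- ===== PORT A =====
def cnt1 (line : String) : Int × Int :=
  let d : PySem.Dict Char Int := line.toList.foldl
    (fun d c =>
      let d := if d.contains c then d else d.insert c 0
      d.insert c (d.getD c 0 + 1))
    PySem.Dict.empty
  let c2 : Int := if d.values.contains 2 then 1 else 0
  let c3 : Int := if d.values.contains 3 then 1 else 0
  (c2, c3)

-- ===== PORT B =====
-- Source B's index loop 'for i in range(1, len(s)+1)' comparing s[i] with s[i-1] is ported as the
-- obvious structural recursion carrying the previous character and the loop state (run, has2, has3).
def cnt1RunScan (prev : Char) (run : Nat) (has2 has3 : Bool) : List Char → Bool × Bool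
  | [] => (has2 || run == 2, has3 || run == 3)
  | c :: rest =>
    if c == prev then cnt1RunScan prev (run + 1) has2 has3 rest
    else cnt1RunScan c 1 (has2 || run == 2) (has3 || run == 3) rest

def cnt1_alt (line : String) : Int × Int :=
  match PySem.List.sorted line.toList (fun x => x) false with
  | [] => (0, 0)
  | c :: rest =>
    let (b2, b3) := cnt1RunScan c 1 false false rest
    (if b2 then 1 else 0, if b3 then 1 else 0)

-- ===== PRECONDITION & SPEC =====
def Spec_cnt1 (line : String) (out : Int × Int) : Prop := out = cnt1_alt line
instance (line : String) (out : Int × Int) : Decidable (Spec_cnt1 line out) := by unfold Spec_cnt1; infer_instance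

-- ===== CLAIM (what is proved, stated in full; the proofs are below) =====
def Claim_equal_cnt1 : Prop := ∀ (line : String), Dom_cnt1 line → Spec_cnt1 line (cnt1 line)

-- ===== LEMMAS AND PROOFS =====

-- "some character occurs exactly k times in l", as a Bool
def hasCount (k : Nat) (l : List Char) : Bool := decide (∃ c, c ∈ l ∧ l.count c = k)

lemma hasCount_nil (k : Nat) : hasCount k [] = false := by simp [hasCount]

lemma hasCount_perm {xs ys : List Char} (h : xs.Perm ys) (k : Nat) :
    hasCount k xs = hasCount k ys := by
  simp only [hasCount, decide_eq_decide]
  constructor <;> rintro ⟨c, hm, hc⟩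
  · exact ⟨c, h.mem_iff.mp hm, (h.count_eq c) ▸ hc⟩
  · exact ⟨c, h.mem_iff.mpr hm, (h.count_eq c) ▸ hc⟩

lemma hasCount_cons (k : Nat) (c : Char) (rest : List Char) :
    hasCount k (c :: rest) =
      ((1 + rest.count c == k) || hasCount k (rest.filter (fun x => x ≠ c))) := by
  apply Bool.eq_iff_iff.mpr
  simp only [hasCount, Bool.or_eq_true, beq_iff_eq, decide_eq_true_eq]
  constructor
  · rintro ⟨d, hm, hc⟩
    by_cases hdc : d = c
    · subst hdc
      left; rw [List.count_cons_self] at hc; omega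
    · right
      refine ⟨d, ?_, ?_⟩
      · have hdr : d ∈ rest := by
          rcases List.mem_cons.mp hm with h | h
          · exact absurd h hdc
          · exact h
        simp [List.mem_filter, hdr, hdc]
      · have hdc' : ¬ c = d := fun h => hdc h.symm
        rw [List.count_filter (by simp [hdc])]
        simpa [List.count_cons, hdc'] using hc
  · rintro (hc | ⟨d, hm, hc⟩)
    · exact ⟨c, List.mem_cons_self, by rw [List.count_cons_self]; omega⟩
    · have hm' := List.mem_filter.mp hm
      have hdc : d ≠ c := by simpa using hm'.2
      have hdc' : ¬ c = d := fun h => hdc h.symm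
      refine ⟨d, List.mem_cons_of_mem _ hm'.1, ?_⟩
      rw [List.count_filter (by simp [hdc])] at hc
      simpa [List.count_cons, hdc'] using hc

-- the run scan on a sorted tail computes "run so far finished as k" or "some later run has length k"
lemma cnt1RunScan_eq (l : List Char) : ∀ (prev : Char) (run : Nat) (h2 h3 : Bool),
    (prev :: l).Pairwise (· ≤ ·) →
    cnt1RunScan prev run h2 h3 l =
      (h2 || (run + l.count prev == 2) || hasCount 2 (l.filter (fun x => x ≠ prev)),
       h3 || (run + l.count prev == 3) || hasCount 3 (l.filter (fun x => x ≠ prev))) := by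
  induction l with
  | nil => intro prev run h2 h3 _; simp [cnt1RunScan, hasCount_nil]
  | cons c rest ih =>
    intro prev run h2 h3 hs
    rcases List.pairwise_cons.mp hs with ⟨hle, hs'⟩
    by_cases hcp : c = prev
    · subst hcp
      have hsub : (c :: rest).Pairwise (· ≤ ·) := by
        refine hs.sublist ?_
        exact List.Sublist.cons₂ c (List.sublist_cons_self c rest)
      have := ih c (run + 1) h2 h3 hsub
      simp only [cnt1RunScan, beq_self_eq_true, if_true, this,
        List.count_cons_self, List.filter_cons]
      have harith : run + 1 + rest.count c = run + (rest.count c + 1) := by omega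
      simp [harith]
    · have hbeq : (c == prev) = false := by simp [hcp]
      have hprevc : prev < c := lt_of_le_of_ne (hle c List.mem_cons_self) (Ne.symm hcp)
      have hnot : ∀ x ∈ c :: rest, x ≠ prev := by
        intro x hx
        rcases List.mem_cons.mp hx with h | h
        · subst h; exact Ne.symm (ne_of_lt hprevc)
        · have hcx : c ≤ x := (List.pairwise_cons.mp hs').1 x h
          exact Ne.symm (ne_of_lt (lt_of_lt_of_le hprevc hcx))
      have hcount0 : (c :: rest).count prev = 0 :=
        List.count_eq_zero.mpr (fun hmem => hnot prev hmem rfl)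
      have hfilter : (c :: rest).filter (fun x => x ≠ prev) = c :: rest :=
        List.filter_eq_self.mpr (fun x hx => by simpa using hnot x hx)
      have := ih c 1 (h2 || (run == 2)) (h3 || (run == 3)) hs'
      simp only [cnt1RunScan, hbeq, Bool.false_eq_true, if_false, this, hcount0,
        Nat.add_zero, hfilter, hasCount_cons, Bool.or_assoc]

-- A's branchy update ('if not c in d: d[c]=0; d[c]+=1') is the counter step
lemma cnt1_step_eq (d : PySem.Dict Char Int) (c : Char) :
    (let d' := if d.contains c then d else d.insert c 0
     d'.insert c (d'.getD c 0 + 1)) = d.insert c (d.getD c 0 + 1) := by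
  by_cases h : d.contains c = true
  · simp [h]
  · have hn : d.get? c = none := Option.not_isSome_iff_eq_none.mp
      (by rw [← PySem.Dict.contains_eq_isSome_get?]; simpa using h)
    simp [h, hn, PySem.Dict.getD, PySem.Dict.get?_insert_self, PySem.Dict.insert_insert_self]

-- values of the counter: one count per distinct character; containment of k is hasCount k
lemma cnt1_values_contains (xs : List Char) (k : Nat) :
    ((PySem.Dict.counter xs).values.contains (k : Int)) = hasCount k xs := by
  simp only [PySem.Dict.values, PySem.Dict.items_counter, List.map_map,
    List.contains_eq_any_beq, List.any_map, hasCount]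
  apply Bool.eq_iff_iff.mpr
  simp only [List.any_eq_true, Function.comp_apply, beq_iff_eq, decide_eq_true_eq]
  constructor
  · rintro ⟨c, hm, hc⟩
    refine ⟨c, (PySem.Set.mem_ofList _ _).mp hm, ?_⟩
    exact_mod_cast hc.symm
  · rintro ⟨c, hm, hc⟩
    exact ⟨c, (PySem.Set.mem_ofList _ _).mpr hm, by exact_mod_cast hc.symm⟩

-- ===== VERDICT (by name: the statement is the Claim_ definition above) =====
theorem cnt1_spec : Claim_equal_cnt1 := by
  intro line _
  unfold Spec_cnt1 cnt1 cnt1_alt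
  have hstep : (fun (d : PySem.Dict Char Int) (c : Char) =>
      let d' := if d.contains c then d else d.insert c 0
      d'.insert c (d'.getD c 0 + 1)) = fun d c => d.insert c (d.getD c 0 + 1) :=
    funext fun d => funext fun c => cnt1_step_eq d c
  simp only [hstep, PySem.Dict.foldl_insert_getD_add_one_eq_counter]
  have h2 := cnt1_values_contains line.toList 2
  have h3 := cnt1_values_contains line.toList 3
  simp only [Nat.cast_ofNat] at h2 h3
  rw [h2, h3]
  have hperm : (PySem.List.sorted line.toList (fun x => x) false).Perm line.toList :=
    PySem.List.sorted_perm _ _ _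
  rw [hasCount_perm hperm.symm 2, hasCount_perm hperm.symm 3]
  cases hsort : PySem.List.sorted line.toList (fun x => x) false with
  | nil => simp [hasCount_nil]
  | cons c rest =>
    have hpw : (c :: rest).Pairwise (· ≤ ·) := by
      have := PySem.List.sorted_pairwise line.toList (fun x => x)
      rw [hsort] at this
      exact this
    dsimp only
    rw [cnt1RunScan_eq rest c 1 false false hpw]
    simp only [hasCount_cons, Bool.false_or]
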